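-- pv_equiv track=rewrite | github.com/TrojanPt/Chat-in-RenPy | game/rpy_script/FuncDef_ren.py | cut_response
-- ===== SOURCE A (Python) =====
-- def cut_response(content, cut):
--     """
--     在指定位置后寻找句子分界点
--
--     Args:
--         content: 待分割的文本内容
--         cut_pos: 开始查找的起始位置
--
--     Returns:
--         int: 下一个分割点位置
--     """
--     punds = {'.', ';', '?', '!', '。', '？', '！', ';'}
--     for i in range(cut, len(content)):
--         if content[i] in punds:
--             # 排除.作为小数点的情况
--             if content[i] == '.' and i > 0 and i < len(content) - 1 and content[i - 1].isdigit() and content[i + 1].isdigit():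
--                 continue
--             else:
--                 next_cut = i + 1
--                 return next_cut
--     return
-- ===== SOURCE B (Python) =====
-- def cut_response(content, cut):
--     # Instead of one character-by-character scan, take the minimum over the
--     # first occurrence (str.find) of each boundary character, handling '.'
--     # with a find-chain that skips decimal points.
--     n = len(content)
--     best = -1
--     for p in ';?!\u3002\uff1f\uff01':
--         j = content.find(p, cut)
--         if j != -1 and (best == -1 or j < best):
--             best = j
--     j = content.find('.', cut)
--     while j != -1 and 0 < j < n - 1 and content[j - 1].isdigit() and content[j + 1].isdigit():
--         j = content.find('.', j + 1)
--     if j != -1 and (best == -1 or j < best):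
--         best = j
--     return best + 1 if best != -1 else None
-- ===== Notes on version B (the rewrite author's own statement) =====
-- stated objective: faster
-- what changed: Replaces the character-by-character Python scan with per-punctuation str.find calls combined by minimum (plus a find-chain for '.' skipping decimal points), moving the scan into C-level str.find.
-- outside the precondition, e.g. on cut_response('a.b', -2): A returns -1, B returns 2; on cut_response('1.2;', -1): A returns 0, B returns 4
import Mathlib
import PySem

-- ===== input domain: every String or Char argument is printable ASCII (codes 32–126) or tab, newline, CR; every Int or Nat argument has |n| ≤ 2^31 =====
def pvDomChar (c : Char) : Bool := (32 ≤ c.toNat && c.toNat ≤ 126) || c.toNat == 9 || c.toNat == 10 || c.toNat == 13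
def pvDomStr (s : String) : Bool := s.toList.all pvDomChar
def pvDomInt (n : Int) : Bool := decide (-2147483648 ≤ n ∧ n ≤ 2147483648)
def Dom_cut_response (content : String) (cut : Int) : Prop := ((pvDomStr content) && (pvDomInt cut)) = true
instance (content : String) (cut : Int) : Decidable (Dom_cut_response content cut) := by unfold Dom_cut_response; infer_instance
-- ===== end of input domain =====

-- B replaces A's single character-by-character scan with per-punctuation str.find calls
-- combined by minimum (plus a find-chain for '.' skipping decimal points); return value only,
-- no side effects in either program.

-- ===== PORT A =====
-- punds = {'.', ';', '?', '!', '。', '？', '！', ';'}  (a Python set literal)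
def pvPunds : List Char := PySem.Set.ofList ['.', ';', '?', '!', '。', '？', '！', ';']

-- the 'for i in range(cut, len(content))' loop; 'none' on pyGet? failure is where Python
-- raises IndexError (cut < -len(content)), outside Pre_.
-- content[i-1].isdigit() on the 1-char string content[i-1] is exactly Chars.isdigit of that char.
def pvCutLoopA (l : List Char) (idxs : List Int) : Option Int :=
  match idxs with
  | [] => none
  | i :: rest =>
    match PySem.List.pyGet? l i with
    | none => none
    | some c =>
      if c ∈ pvPunds then
        if c = '.' ∧ 0 < i ∧ i < (l.length : Int) - 1 ∧
            PySem.Chars.isdigit (PySem.List.pyGetD l (i - 1) ' ') ∧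
            PySem.Chars.isdigit (PySem.List.pyGetD l (i + 1) ' ') then
          pvCutLoopA l rest
        else
          some (i + 1)
      else
        pvCutLoopA l rest

def cut_response (content : String) (cut : Int) : Option Int :=
  pvCutLoopA content.toList (PySem.List.pyRange cut (content.toList.length : Int) 1)

-- ===== PORT B =====
-- the 'for p in ';?!。？！'' loop of Source B: best = running minimum of content.find(p, cut)
def pvFindMinB (l : List Char) (cut : Int) (ps : List Char) (best : Int) : Int :=
  match ps with
  | [] => best
  | p :: rest =>
    let j := PySem.Chars.findFrom l [p] cut
    pvFindMinB l cut rest (if j ≠ -1 ∧ (best = -1 ∨ j < best) then j else best)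

-- the 'while' find-chain for '.'; each step restarts the find strictly to the right, so at most
-- l.length steps run: fuel l.length + 1 never runs out (hand-ported loop, exact on every input).
def pvDotChainB (l : List Char) (fuel : Nat) (j : Int) : Int :=
  match fuel with
  | 0 => j
  | fuel + 1 =>
    if j ≠ -1 ∧ 0 < j ∧ j < (l.length : Int) - 1 ∧
        PySem.Chars.isdigit (PySem.List.pyGetD l (j - 1) ' ') ∧
        PySem.Chars.isdigit (PySem.List.pyGetD l (j + 1) ' ') then
      pvDotChainB l fuel (PySem.Chars.findFrom l ['.'] (j + 1))
    else
      j

def cut_response_alt (content : String) (cut : Int) : Option Int :=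
  let l := content.toList
  let best1 := pvFindMinB l cut [';', '?', '!', '。', '？', '！'] (-1)
  let j := pvDotChainB l (l.length + 1) (PySem.Chars.findFrom l ['.'] cut)
  let best := if j ≠ -1 ∧ (best1 = -1 ∨ j < best1) then j else best1
  if best ≠ -1 then some (best + 1) else none

-- ===== PRECONDITION & SPEC =====
-- Pre_ excludes negative cut: there A either raises IndexError (cut < -len(content)) or scans
-- through Python's accidental negative-index wraparound, returning non-positive "positions"
-- such as -1 or 0 that no caller could use; B searches from a clamped start instead.
def Pre_cut_response (content : String) (cut : Int) : Prop := 0 ≤ cut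
instance (content : String) (cut : Int) : Decidable (Pre_cut_response content cut) := by
  unfold Pre_cut_response; infer_instance

def pvWitness_cut_response : String × Int := ("ab 1.5x. ok?", 1)

def Spec_cut_response (content : String) (cut : Int) (out : Option Int) : Prop := out = cut_response_alt content cut
instance (content : String) (cut : Int) (out : Option Int) : Decidable (Spec_cut_response content cut out) := by unfold Spec_cut_response; infer_instance

-- ===== CLAIM (what is proved, stated in full; the proofs are below) =====
def Claim_equal_cut_response : Prop := ∀ (content : String) (cut : Int), Dom_cut_response content cut → Pre_cut_response content cut → Spec_cut_response content cut (cut_response content cut)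

-- ===== LEMMAS AND PROOFS =====

-- first index i with k ≤ i < n and P i, the common characterisation both ports are reduced to
def pvFirstP (P : Nat → Bool) (n k : Nat) : Option Nat :=
  if h : k < n then (if P k then some k else pvFirstP P n (k + 1)) else none
termination_by n - k

-- encoding of "index or -1"
def pvEnc : Option Nat → Int
  | none => -1
  | some i => (i : Int)

-- minimum with none = +∞
def pvOMin : Option Nat → Option Nat → Option Nat
  | none, o => o
  | some a, none => some a
  | some a, some b => some (min a b)

def pvCharP (l : List Char) (p : Char) (i : Nat) : Bool := l.getD i ' ' == p

def pvDecP (l : List Char) (i : Nat) : Bool :=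
  decide (0 < i) && decide (i + 1 < l.length) &&
    PySem.Chars.isdigit (l.getD (i - 1) ' ') && PySem.Chars.isdigit (l.getD (i + 1) ' ')

def pvDotP (l : List Char) (i : Nat) : Bool := pvCharP l '.' i && !pvDecP l i

def pvBP (l : List Char) (i : Nat) : Bool :=
  pvCharP l ';' i || pvCharP l '?' i || pvCharP l '!' i ||
  pvCharP l '。' i || pvCharP l '？' i || pvCharP l '！' i || pvDotP l i

lemma pvFirstP_eq_none (P : Nat → Bool) (n k : Nat) :
    pvFirstP P n k = none ↔ ∀ j, k ≤ j → j < n → P j = false := by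
  fun_induction pvFirstP P n k with
  | case1 k h hP =>
    simp only [reduceCtorEq, false_iff]
    push_neg
    exact ⟨k, le_refl k, h, by simp [hP]⟩
  | case2 k h hP ih =>
    rw [ih]
    constructor
    · intro H j hj hjn
      rcases Nat.eq_or_lt_of_le hj with rfl | h2
      · simpa using hP
      · exact H j h2 hjn
    · intro H j hj hjn; exact H j (by omega) hjn
  | case3 k h => simp only [true_iff]; intro j hj hjn; omega

lemma pvFirstP_eq_some (P : Nat → Bool) (n k i : Nat) :
    pvFirstP P n k = some i ↔
      k ≤ i ∧ i < n ∧ P i = true ∧ ∀ j, k ≤ j → j < i → P j = false := by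
  fun_induction pvFirstP P n k with
  | case1 k h hP =>
    simp only [Option.some.injEq]
    constructor
    · rintro rfl; exact ⟨le_refl k, h, hP, by omega⟩
    · rintro ⟨h1, h2, h3, h4⟩
      by_contra hne
      have := h4 k (le_refl k) (by omega)
      simp [hP] at this
  | case2 k h hP ih =>
    rw [ih]
    constructor
    · rintro ⟨h1, h2, h3, h4⟩
      refine ⟨by omega, h2, h3, fun j hj hji => ?_⟩
      rcases Nat.eq_or_lt_of_le hj with rfl | hlt
      · simpa using hP
      · exact h4 j hlt hji
    · rintro ⟨h1, h2, h3, h4⟩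
      have hki : k ≠ i := by rintro rfl; simp [hP] at h3
      exact ⟨by omega, h2, h3, fun j hj hji => h4 j (by omega) hji⟩
  | case3 k h =>
    simp only [reduceCtorEq, false_iff]
    rintro ⟨h1, h2, h3, h4⟩; omega

lemma pvFirstP_shift (P : Nat → Bool) (n k k' : Nat) (hk : k ≤ k')
    (h : ∀ j, k ≤ j → j < k' → P j = false) :
    pvFirstP P n k = pvFirstP P n k' := by
  rcases hv : pvFirstP P n k' with _ | i
  · rw [pvFirstP_eq_none] at hv ⊢
    intro j hj hjn
    by_cases hjk : j < k'
    · exact h j hj hjk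
    · exact hv j (by omega) hjn
  · rw [pvFirstP_eq_some] at hv ⊢
    obtain ⟨h1, h2, h3, h4⟩ := hv
    refine ⟨by omega, h2, h3, fun j hj hji => ?_⟩
    by_cases hjk : j < k'
    · exact h j hj hjk
    · exact h4 j (by omega) hji

lemma pvFirstP_or (P Q : Nat → Bool) (n k : Nat) :
    pvFirstP (fun i => P i || Q i) n k = pvOMin (pvFirstP P n k) (pvFirstP Q n k) := by
  rcases hp : pvFirstP P n k with _ | a <;> rcases hq : pvFirstP Q n k with _ | b
  · rw [pvFirstP_eq_none] at hp hq
    simp only [pvOMin]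
    rw [pvFirstP_eq_none]
    intro j hj hjn
    simp [hp j hj hjn, hq j hj hjn]
  · rw [pvFirstP_eq_none] at hp
    rw [pvFirstP_eq_some] at hq
    obtain ⟨h1, h2, h3, h4⟩ := hq
    simp only [pvOMin]
    rw [pvFirstP_eq_some]
    exact ⟨h1, h2, by simp [h3], fun j hj hji => by
      simp [hp j hj (by omega), h4 j hj hji]⟩
  · rw [pvFirstP_eq_none] at hq
    rw [pvFirstP_eq_some] at hp
    obtain ⟨h1, h2, h3, h4⟩ := hp
    simp only [pvOMin]
    rw [pvFirstP_eq_some]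
    exact ⟨h1, h2, by simp [h3], fun j hj hji => by
      simp [hq j hj (by omega), h4 j hj hji]⟩
  · rw [pvFirstP_eq_some] at hp hq
    obtain ⟨p1, p2, p3, p4⟩ := hp
    obtain ⟨q1, q2, q3, q4⟩ := hq
    simp only [pvOMin]
    rw [pvFirstP_eq_some]
    rcases Nat.le_total a b with hab | hab
    · rw [Nat.min_eq_left hab]
      exact ⟨p1, p2, by simp [p3], fun j hj hji => by
        simp [p4 j hj hji, q4 j hj (by omega)]⟩
    · rw [Nat.min_eq_right hab]
      exact ⟨q1, q2, by simp [q3], fun j hj hji => by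
        simp [q4 j hj hji, p4 j hj (by omega)]⟩

-- single-character find: relative first-occurrence function for find.go
def pvRel (p : Char) : List Char → Option Nat
  | [] => none
  | c :: t => if c = p then some 0 else (pvRel p t).map (· + 1)

lemma pvGo_single (p : Char) (l : List Char) (k : Nat) :
    PySem.Chars.find.go [p] l k =
      (match pvRel p l with
       | none => -1
       | some i => (k : Int) + (i : Int)) := by
  induction l generalizing k with
  | nil => simp [PySem.Chars.find.go, pvRel]
  | cons c t ih =>
    rw [PySem.Chars.find.go]
    by_cases hc : c = p
    · subst hc
      simp [List.isPrefixOf, pvRel]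
    · rw [ih (k+1)]
      simp only [pvRel, if_neg hc]
      rcases pvRel p t with _ | i
      · simp [List.isPrefixOf]
        exact fun h => hc h.symm
      · simp only [List.isPrefixOf, Bool.and_true, Option.map_some]
        rw [if_neg (fun h : (p == c) = true => hc (by simpa using (beq_iff_eq.mp h).symm))]
        push_cast
        ring

lemma pvRel_drop (l : List Char) (p : Char) (m : Nat) :
    pvFirstP (pvCharP l p) l.length m = (pvRel p (l.drop m)).map (m + ·) := by
  by_cases h : m < l.length
  · rw [pvFirstP, dif_pos h]
    have hd : l.drop m = l[m] :: l.drop (m+1) := List.drop_eq_getElem_cons h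
    rw [hd]
    by_cases hc : l[m] = p
    · simp [pvRel, pvCharP, List.getD_eq_getElem?_getD, List.getElem?_eq_getElem h, hc]
    · rw [if_neg (by simp [pvCharP, List.getD_eq_getElem?_getD, List.getElem?_eq_getElem h, hc])]
      rw [pvRel_drop l p (m+1)]
      simp only [pvRel, if_neg hc]
      rcases pvRel p (l.drop (m+1)) with _ | i
      · simp
      · simp; omega
  · rw [pvFirstP, dif_neg h, List.drop_of_length_le (by omega)]
    simp [pvRel]
termination_by l.length - m

lemma pvFindFrom_single (l : List Char) (p : Char) (k : Int) (hk : 0 ≤ k) :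
    PySem.Chars.findFrom l [p] k = pvEnc (pvFirstP (pvCharP l p) l.length k.toNat) := by
  rw [PySem.Chars.findFrom]
  simp only [if_neg (show ¬ k < 0 by omega)]
  by_cases hbig : (l.length : Int) < k
  · rw [if_pos hbig]
    rw [pvFirstP, dif_neg (by omega)]
    rfl
  · rw [if_neg hbig]
    have htake : l.take (l.length : Int).toNat = l := by simp
    rw [htake]
    have : PySem.Chars.find (l.drop k.toNat) [p] = pvEnc (pvRel p (l.drop k.toNat)) := by
      rw [PySem.Chars.find, pvGo_single]
      rcases pvRel p (l.drop k.toNat) with _ | i <;> simp [pvEnc]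
    rw [this, pvRel_drop]
    rcases pvRel p (l.drop k.toNat) with _ | i
    · simp [pvEnc]
    · simp only [pvEnc, Option.map_some]
      rw [if_neg (by omega)]
      push_cast
      omega

lemma pvMinStep (o1 o2 : Option Nat) :
    (if pvEnc o1 ≠ -1 ∧ (pvEnc o2 = -1 ∨ pvEnc o1 < pvEnc o2) then pvEnc o1 else pvEnc o2)
      = pvEnc (pvOMin o1 o2) := by
  rcases o1 with _ | a <;> rcases o2 with _ | b <;> simp [pvEnc, pvOMin] <;> split_ifs <;>
    simp_all <;> omega

lemma pvOMin_comm (o1 o2 : Option Nat) : pvOMin o1 o2 = pvOMin o2 o1 := by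
  rcases o1 with _ | a <;> rcases o2 with _ | b <;> simp [pvOMin, Nat.min_comm]


lemma pvGetD_eq (l : List Char) (k : Nat) (hk : k < l.length) : l.getD k ' ' = l[k] := by
  rw [List.getD_eq_getElem?_getD, List.getElem?_eq_getElem hk, Option.getD_some]

lemma pvDec_iff (l : List Char) (k : Nat) :
    ((0:Int) < (k:Int) ∧ (k:Int) < (l.length:Int) - 1 ∧
      PySem.Chars.isdigit (PySem.List.pyGetD l ((k:Int) - 1) ' ') = true ∧
      PySem.Chars.isdigit (PySem.List.pyGetD l ((k:Int) + 1) ' ') = true)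
    ↔ pvDecP l k = true := by
  by_cases h0 : 0 < k
  · have h1 : (k:Int) - 1 = ((k-1 : Nat) : Int) := by push_cast [h0]; ring
    have h2 : (k:Int) + 1 = ((k+1 : Nat) : Int) := by push_cast; ring
    rw [h1, h2, PySem.List.pyGetD_natCast, PySem.List.pyGetD_natCast]
    simp only [pvDecP, Bool.and_eq_true, decide_eq_true_eq]
    constructor
    · rintro ⟨a, b, c, d⟩; exact ⟨⟨⟨h0, by omega⟩, c⟩, d⟩
    · rintro ⟨⟨⟨a, b⟩, c⟩, d⟩; exact ⟨by omega, by omega, c, d⟩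
  · simp only [pvDecP, Bool.and_eq_true, decide_eq_true_eq]
    constructor
    · rintro ⟨a, _⟩; omega
    · rintro ⟨⟨⟨a, _⟩, _⟩, _⟩; omega

lemma pvFindMinB_spec (l : List Char) (k : Nat) :
    ∀ (ps : List Char) (o : Option Nat),
      pvFindMinB l (k : Int) ps (pvEnc o) =
        pvEnc (ps.foldl (fun acc p => pvOMin acc (pvFirstP (pvCharP l p) l.length k)) o) := by
  intro ps
  induction ps with
  | nil => intro o; rfl
  | cons p rest ih =>
    intro o
    rw [pvFindMinB]
    have hff : PySem.Chars.findFrom l [p] (k : Int) =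
        pvEnc (pvFirstP (pvCharP l p) l.length k) := by
      rw [pvFindFrom_single l p (k : Int) (by positivity)]
      simp
    simp only [hff, pvMinStep, List.foldl_cons]
    rw [pvOMin_comm]
    exact ih (pvOMin o (pvFirstP (pvCharP l p) l.length k))

lemma pvDotChainB_spec (l : List Char) :
    ∀ (fuel k : Nat), l.length - k < fuel →
      pvDotChainB l fuel (pvEnc (pvFirstP (pvCharP l '.') l.length k)) =
        pvEnc (pvFirstP (pvDotP l) l.length k) := by
  intro fuel
  induction fuel with
  | zero => intro k h; omega
  | succ fuel ih =>
    intro k h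
    rcases hp : pvFirstP (pvCharP l '.') l.length k with _ | i
    · rw [pvDotChainB, if_neg (by simp [pvEnc])]
      rcases hd : pvFirstP (pvDotP l) l.length k with _ | i
      · rfl
      · obtain ⟨_, h2, h3, _⟩ := (pvFirstP_eq_some _ _ _ _).1 hd
        rw [pvFirstP_eq_none] at hp
        simp [pvDotP, hp i (by omega) h2] at h3
    · obtain ⟨hki, hin, hchar, hmin⟩ := (pvFirstP_eq_some _ _ _ _).1 hp
      by_cases hdec : pvDecP l i = true
      · rw [pvDotChainB,
          if_pos ⟨by simp [pvEnc], ((pvDec_iff l i).2 hdec).1,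
            ((pvDec_iff l i).2 hdec).2.1, ((pvDec_iff l i).2 hdec).2.2.1,
            ((pvDec_iff l i).2 hdec).2.2.2⟩]
        have hcast : pvEnc (some i) + 1 = ((i + 1 : Nat) : Int) := by
          simp [pvEnc]
        rw [hcast, pvFindFrom_single l '.' ((i+1 : Nat) : Int) (by positivity)]
        rw [Int.toNat_natCast, ih (i+1) (by omega)]
        congr 1
        refine (pvFirstP_shift (pvDotP l) l.length k (i+1) (by omega) ?_).symm
        intro j hj hji
        by_cases hji' : j < i
        · simp [pvDotP, hmin j hj hji']
        · have : j = i := by omega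
          subst this
          simp [pvDotP, hdec]
      · rw [pvDotChainB,
          if_neg (by
            rintro ⟨_, hcond⟩
            exact hdec ((pvDec_iff l i).1 hcond))]
        have : pvFirstP (pvDotP l) l.length k = some i := by
          rw [pvFirstP_eq_some]
          refine ⟨hki, hin, by simp [pvDotP, hchar, hdec], fun j hj hji => ?_⟩
          simp [pvDotP, hmin j hj hji]
        rw [this]

lemma pvA_loop (l : List Char) (k : Nat) :
    pvCutLoopA l (PySem.List.pyRange (k : Int) (l.length : Int) 1) =
      (pvFirstP (pvBP l) l.length k).map (fun j => (j : Int) + 1) := by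
  by_cases hk : k < l.length
  · rw [PySem.List.pyRange_one_cons (by exact_mod_cast hk)]
    have hcast : (k:Int) + 1 = ((k+1 : Nat) : Int) := by push_cast; ring
    have hget : PySem.List.pyGet? l (k : Int) = some l[k] := by
      rw [PySem.List.pyGet?_natCast, List.getElem?_eq_getElem hk]
    rw [pvCutLoopA, hget]
    dsimp only
    have hgd := pvGetD_eq l k hk
    by_cases hm : l[k] ∈ pvPunds
    · by_cases hdot : l[k] = '.'
      · by_cases hdec : pvDecP l k = true
        · rw [if_pos hm, if_pos ⟨hdot, (pvDec_iff l k).2 hdec⟩]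
          conv_rhs => rw [pvFirstP]
          rw [dif_pos hk,
            if_neg (by simp [pvBP, pvCharP, pvDotP, List.getElem?_eq_getElem hk, hdot, hdec])]
          rw [hcast, pvA_loop l (k+1)]
        · rw [if_pos hm, if_neg (fun hcond => hdec ((pvDec_iff l k).1 hcond.2))]
          conv_rhs => rw [pvFirstP]
          rw [dif_pos hk,
            if_pos (by simp [pvBP, pvCharP, pvDotP, List.getElem?_eq_getElem hk, hdot, hdec])]
          rfl
      · have hmem : l[k] = ';' ∨ l[k] = '?' ∨ l[k] = '!' ∨ l[k] = '。' ∨ l[k] = '？' ∨ l[k] = '！' := by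
          have := hm
          simp [pvPunds, PySem.Set.mem_ofList] at this
          tauto
        rw [if_pos hm, if_neg (fun hcond => hdot hcond.1)]
        conv_rhs => rw [pvFirstP]
        rw [dif_pos hk,
          if_pos (by rcases hmem with h|h|h|h|h|h <;> simp [pvBP, pvCharP, List.getElem?_eq_getElem hk, h])]
        rfl
    · have hne : l[k] ≠ '.' ∧ l[k] ≠ ';' ∧ l[k] ≠ '?' ∧ l[k] ≠ '!' ∧ l[k] ≠ '。' ∧ l[k] ≠ '？' ∧ l[k] ≠ '！' := by
        simp [pvPunds, PySem.Set.mem_ofList] at hm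
        tauto
      rw [if_neg hm]
      conv_rhs => rw [pvFirstP]
      rw [dif_pos hk,
        if_neg (by simp [pvBP, pvCharP, pvDotP, List.getElem?_eq_getElem hk, hne.1, hne.2.1, hne.2.2.1, hne.2.2.2.1, hne.2.2.2.2.1, hne.2.2.2.2.2.1, hne.2.2.2.2.2.2])]
      rw [hcast, pvA_loop l (k+1)]
  · rw [PySem.List.pyRange_one_eq_nil (by exact_mod_cast Nat.le_of_not_lt hk)]
    rw [pvCutLoopA, pvFirstP, dif_neg hk]
    rfl
termination_by l.length - k

lemma pvB_first (l : List Char) (k : Nat) :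
    pvFirstP (pvBP l) l.length k =
      pvOMin (pvFirstP (pvDotP l) l.length k)
        ([';', '?', '!', '。', '？', '！'].foldl
          (fun acc p => pvOMin acc (pvFirstP (pvCharP l p) l.length k)) none) := by
  have hbp : pvBP l = fun i =>
      (pvCharP l ';' i || pvCharP l '?' i || pvCharP l '!' i ||
        pvCharP l '。' i || pvCharP l '？' i || pvCharP l '！' i) || pvDotP l i := by
    funext i
    simp [pvBP, Bool.or_assoc]
  rw [hbp, pvFirstP_or, pvOMin_comm]
  congr 1
  rw [pvFirstP_or, pvFirstP_or, pvFirstP_or, pvFirstP_or, pvFirstP_or]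
  simp only [List.foldl_cons, List.foldl_nil]
  have h0 : ∀ o : Option Nat, pvOMin none o = o := fun o => rfl
  rw [h0]

-- ===== VERDICT (by name: the statement is the Claim_ definition above) =====
lemma pvEncMap (o : Option Nat) :
    (if pvEnc o ≠ -1 then some (pvEnc o + 1) else none) =
      o.map (fun j => (j : Int) + 1) := by
  cases o with
  | none => simp [pvEnc]
  | some i => simp [pvEnc]

theorem cut_response_spec : Claim_equal_cut_response := by
  intro content cut hDom hPre
  unfold Spec_cut_response cut_response cut_response_alt
  have hPre' : 0 ≤ cut := hPre
  set l := content.toList with hl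
  have hcut : cut = ((cut.toNat : Nat) : Int) := (Int.toNat_of_nonneg hPre').symm
  set k := cut.toNat with hkdef
  rw [hcut, pvA_loop l k]
  have hb1 : pvFindMinB l (k : Int) [';', '?', '!', '。', '？', '！'] (-1) =
      pvEnc ([';', '?', '!', '。', '？', '！'].foldl
        (fun acc p => pvOMin acc (pvFirstP (pvCharP l p) l.length k)) none) :=
    pvFindMinB_spec l k _ none
  have hj : pvDotChainB l (l.length + 1) (PySem.Chars.findFrom l ['.'] (k : Int)) =
      pvEnc (pvFirstP (pvDotP l) l.length k) := by
    rw [pvFindFrom_single l '.' (k : Int) (by positivity), Int.toNat_natCast]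
    exact pvDotChainB_spec l (l.length + 1) k (by omega)
  simp only [hb1, hj, pvMinStep, ← pvB_first, pvEncMap]
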